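-- pv_equiv track=rewrite | github.com/MarWit/University | SztucznaInteligencja/lista2/nono.py | opt_dist_old
-- ===== SOURCE A (Python) =====
-- def opt_dist_old( l, n ):
--     sum_ = sum( l )
--
--     if len( l ) == n:
--         return n - sum_
--     else:
--         value = sum( l[ :n ] )
--         best_value = value
--
--         for i in range( 1, len( l ) - n + 1 ):
--             value = value - l[ i - 1 ] + l[ i + n - 1 ]
--
--             if value > best_value:
--                 best_value = value
--
--         return n + sum_ - 2 * best_value
-- ===== SOURCE B (Python) =====
-- def opt_dist_old(l, n):
--     # prefix-sum reformulation: window sums are P[i+n]-P[i]; n>=len(l) collapses to n-sum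
--     m = len(l)
--     P = [0]
--     for x in l:
--         P.append(P[-1] + x)
--     total = P[m]
--     if n >= m:
--         return n - total
--     best = max(P[i + n] - P[i] for i in range(m - n + 1))
--     return n + total - 2 * best
-- ===== Notes on version B (the rewrite author's own statement) =====
-- stated objective: alternative
-- what changed: Replaces the sliding-window update loop (value = value - l[i-1] + l[i+n-1] with a running best and a separate len(l)==n branch) by a prefix-sum array P with best = max(P[i+n]-P[i]); the n>=len(l) cases collapse into one closed-form return n - sum.
import Mathlib
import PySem

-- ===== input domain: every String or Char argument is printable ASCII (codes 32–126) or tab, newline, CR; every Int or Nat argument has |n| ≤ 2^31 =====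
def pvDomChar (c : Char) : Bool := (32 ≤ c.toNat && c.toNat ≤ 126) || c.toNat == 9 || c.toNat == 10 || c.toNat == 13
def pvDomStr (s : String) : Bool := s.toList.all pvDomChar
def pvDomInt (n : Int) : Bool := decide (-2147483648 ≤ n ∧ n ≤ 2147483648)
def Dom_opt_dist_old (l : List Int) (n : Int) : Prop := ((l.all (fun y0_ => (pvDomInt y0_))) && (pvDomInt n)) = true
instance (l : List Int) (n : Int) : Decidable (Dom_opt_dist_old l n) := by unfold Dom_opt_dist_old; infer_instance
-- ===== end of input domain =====

-- B replaces A's sliding-window update loop by a prefix-sum array with max over window sums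
-- (same O(len l) cost; objective: alternative algorithm).


-- ===== PORT A =====
-- under Pre_ (0 ≤ n) every index A uses is in range, so pyGetD is exact here
def opt_dist_old (l : List Int) (n : Int) : Int :=
  let sum_ := l.sum
  if (l.length : Int) = n then n - sum_
  else
    let value := (PySem.List.slice l none (some n)).sum
    let st := (PySem.List.pyRange 1 ((l.length : Int) - n + 1) 1).foldl
      (fun (s : Int × Int) i =>
        let value := s.1 - PySem.List.pyGetD l (i - 1) 0 + PySem.List.pyGetD l (i + n - 1) 0
        (value, if value > s.2 then value else s.2))
      (value, value)
    n + sum_ - 2 * st.2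

-- ===== PORT B =====
-- under Pre_ every index B uses into P is in range, so pyGetD is exact here
def opt_dist_old_alt (l : List Int) (n : Int) : Int :=
  let m : Int := l.length
  let P : List Int := l.foldl (fun P x => P ++ [PySem.List.pyGetD P (-1) 0 + x]) [0]
  let total := PySem.List.pyGetD P m 0
  if n ≥ m then n - total
  else
    let best := (PySem.List.max? ((PySem.List.pyRange 0 (m - n + 1) 1).map
        (fun i => PySem.List.pyGetD P (i + n) 0 - PySem.List.pyGetD P i 0)) (fun y => y)).getD 0
    n + total - 2 * best

-- ===== PRECONDITION & SPEC =====
-- A (and B) raise IndexError for every n < 0; Pre_ excludes exactly those inputs.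
def Pre_opt_dist_old (l : List Int) (n : Int) : Prop := 0 ≤ n
instance (l : List Int) (n : Int) : Decidable (Pre_opt_dist_old l n) := by unfold Pre_opt_dist_old; infer_instance
def pvWitness_opt_dist_old : List Int × Int := ([1, 2, 3], 2)

def Spec_opt_dist_old (l : List Int) (n : Int) (out : Int) : Prop := out = opt_dist_old_alt l n
instance (l : List Int) (n : Int) (out : Int) : Decidable (Spec_opt_dist_old l n out) := by unfold Spec_opt_dist_old; infer_instance

-- ===== CLAIM (what is proved, stated in full; the proofs are below) =====
def Claim_equal_opt_dist_old : Prop := ∀ (l : List Int) (n : Int), Dom_opt_dist_old l n → Pre_opt_dist_old l n → Spec_opt_dist_old l n (opt_dist_old l n)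

-- ===== LEMMAS AND PROOFS =====

-- the list of prefix sums starting from s
def prefs (s : Int) : List Int → List Int
  | [] => [s]
  | x :: xs => s :: prefs (s + x) xs

theorem foldl_prefs (l : List Int) : ∀ (A : List Int) (hA : A ≠ []),
    l.foldl (fun P x => P ++ [PySem.List.pyGetD P (-1) 0 + x]) A
      = A.dropLast ++ prefs (A.getLast hA) l := by
  induction l with
  | nil =>
    intro A hA
    simp only [List.foldl_nil, prefs]
    exact (List.dropLast_append_getLast hA).symm
  | cons x xs ih =>
    intro A hA
    have hA' : A ++ [PySem.List.pyGetD A (-1) 0 + x] ≠ [] := by simp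
    simp only [List.foldl_cons, ih _ hA']
    rw [List.dropLast_concat, List.getLast_concat]
    rw [PySem.List.pyGetD_neg_one A 0 hA]
    simp only [prefs]
    have h2 : A.dropLast ++ A.getLast hA :: prefs (A.getLast hA + x) xs
        = (A.dropLast ++ [A.getLast hA]) ++ prefs (A.getLast hA + x) xs := by simp
    rw [h2, List.dropLast_append_getLast hA]

theorem prefs_getD (l : List Int) : ∀ (s : Int) (i : Nat), i ≤ l.length →
    (prefs s l).getD i 0 = s + (l.take i).sum := by
  induction l with
  | nil =>
    intro s i hi
    cases i with
    | zero => simp [prefs]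
    | succ j => exact absurd hi (by simp)
  | cons x xs ih =>
    intro s i hi
    cases i with
    | zero => simp [prefs]
    | succ j =>
      simp only [prefs, List.getD_cons_succ, List.take_succ_cons, List.sum_cons]
      rw [ih (s + x) j (by simpa using hi)]; ring

-- window sum at start i (window width k)
def winS (l : List Int) (k : Nat) (i : Nat) : Int := ((l.drop i).take k).sum

theorem winS_eq_takes (l : List Int) (k i : Nat) :
    winS l k i = (l.take (i + k)).sum - (l.take i).sum := by
  simp [winS, List.take_add]

theorem take_succ_sum (l : List Int) (j : Nat) (hj : j < l.length) :
    (l.take (j + 1)).sum = (l.take j).sum + l.getD j 0 := by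
  rw [List.sum_take_succ l j hj, List.getD_eq_getElem?_getD, List.getElem?_eq_getElem hj]
  simp

-- the sliding-window identity
theorem winS_succ (l : List Int) (k t : Nat) (h : t + k < l.length) :
    winS l k (t + 1) = winS l k t - l.getD t 0 + l.getD (t + k) 0 := by
  have h1 : t < l.length := by omega
  rw [winS_eq_takes, winS_eq_takes]
  have e1 : t + 1 + k = (t + k) + 1 := by omega
  rw [e1, take_succ_sum l (t + k) h, take_succ_sum l t h1]
  ring

-- A's loop invariant
theorem loopA (l : List Int) (k : Nat) :
    ∀ (t : Nat), t + k ≤ l.length →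
    (PySem.List.pyRange 1 ((t : Int) + 1) 1).foldl
      (fun (s : Int × Int) i =>
        let value := s.1 - PySem.List.pyGetD l (i - 1) 0 + PySem.List.pyGetD l (i + (k : Int) - 1) 0
        (value, if value > s.2 then value else s.2))
      (winS l k 0, winS l k 0)
    = (winS l k t, ((List.range t).map (fun i => winS l k (i + 1))).foldl max (winS l k 0)) := by
  intro t
  induction t with
  | zero => intro _; rw [show ((0 : Nat) : Int) + 1 = 1 by norm_num, PySem.List.pyRange_one_eq_nil (by norm_num)]; simp
  | succ t ih =>
    intro ht
    have ht' : t + k ≤ l.length := by omega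
    have hr : PySem.List.pyRange 1 (((t + 1 : Nat) : Int) + 1) 1
        = PySem.List.pyRange 1 ((t : Int) + 1) 1 ++ [(t : Int) + 1] := by
      push_cast
      exact PySem.List.pyRange_one_succ_right (by omega)
    rw [hr, List.foldl_append, ih ht']
    simp only [List.foldl_cons, List.foldl_nil]
    have e1 : (t : Int) + 1 - 1 = ((t : Nat) : Int) := by ring
    have e2 : (t : Int) + 1 + (k : Int) - 1 = ((t + k : Nat) : Int) := by push_cast; ring
    rw [e1, e2, PySem.List.pyGetD_natCast, PySem.List.pyGetD_natCast]
    have hw := winS_succ l k t (by omega)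
    have hmax : ∀ a b : Int, (if b > a then b else a) = max a b := by
      intro a b; split_ifs with h <;> omega
    rw [List.range_succ]
    simp only [List.map_append, List.map_cons, List.map_nil, List.foldl_append,
      List.foldl_cons, List.foldl_nil]
    rw [← hw, hmax]

-- both maxima coincide: B's max? over the mapped range is A's running best
theorem prefs_zero_getD_cast (l : List Int) (i : Nat) (hi : i ≤ l.length) :
    PySem.List.pyGetD (prefs 0 l) ((i : Nat) : Int) 0 = (l.take i).sum := by
  rw [PySem.List.pyGetD_natCast]
  rw [prefs_getD l 0 i hi]; ring

theorem opt_dist_old_spec_aux (l : List Int) (n : Int) (hn : 0 ≤ n) :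
    opt_dist_old l n = opt_dist_old_alt l n := by
  set m : Nat := l.length with hm
  set k : Nat := n.toNat with hk
  have hkn : (k : Int) = n := Int.toNat_of_nonneg hn
  -- B's P is prefs 0 l
  have hP : l.foldl (fun P x => P ++ [PySem.List.pyGetD P (-1) 0 + x]) [0] = prefs 0 l := by
    rw [foldl_prefs l [0] (by simp)]; simp
  have htotal : PySem.List.pyGetD (prefs 0 l) ((m : Nat) : Int) 0 = l.sum := by
    rw [prefs_zero_getD_cast l m (le_refl m)]; simp [hm]
  by_cases hge : n ≥ (m : Int)
  · -- n ≥ len l: both return n - sum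
    unfold opt_dist_old_alt
    simp only [hP, ← hm]
    rw [if_pos hge, htotal]
    unfold opt_dist_old
    by_cases heq : ((l.length : Int) = n)
    · rw [if_pos heq]
    · rw [if_neg heq]
      have hlt : (m : Int) < n := lt_of_le_of_ne hge (by simpa [hm] using heq)
      have hnil : PySem.List.pyRange 1 ((l.length : Int) - n + 1) 1 = [] :=
        PySem.List.pyRange_one_eq_nil (by rw [← hm]; omega)
      rw [hnil]
      simp only [List.foldl_nil]
      have hsl : PySem.List.slice l none (some n) = l.take n.toNat := PySem.List.slice_to l hn
      have : l.take n.toNat = l := List.take_of_length_le (by omega)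
      rw [hsl, this]
      ring
  · -- n < len l
    have hklt : k < m := by omega
    have hne : ¬ ((l.length : Int) = n) := by rw [← hm]; omega
    unfold opt_dist_old opt_dist_old_alt
    simp only [hP, ← hm]
    rw [if_neg hne, if_neg hge, htotal]
    -- A's initial value is winS l k 0
    have hval : (PySem.List.slice l none (some n)).sum = winS l k 0 := by
      rw [PySem.List.slice_to l hn, winS]
      simp [hk]
    -- A's range bound
    have hbound : (m : Int) - n + 1 = ((m - k : Nat) : Int) + 1 := by omega
    rw [hval, hbound]
    -- rewrite A's step function using k
    have hstep : (fun (s : Int × Int) i =>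
        let value := s.1 - PySem.List.pyGetD l (i - 1) 0 + PySem.List.pyGetD l (i + n - 1) 0
        (value, if value > s.2 then value else s.2))
      = (fun (s : Int × Int) i =>
        let value := s.1 - PySem.List.pyGetD l (i - 1) 0 + PySem.List.pyGetD l (i + (k : Int) - 1) 0
        (value, if value > s.2 then value else s.2)) := by
      funext s i; rw [hkn]
    rw [hstep, loopA l k (m - k) (by omega)]
    -- B's list of window sums
    have hmapB : (PySem.List.pyRange 0 (((m - k : Nat) : Int) + 1) 1).map
        (fun i => PySem.List.pyGetD (prefs 0 l) (i + n) 0 - PySem.List.pyGetD (prefs 0 l) i 0)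
        = (List.range (m - k + 1)).map (fun i => winS l k i) := by
      have hb : ((m - k : Nat) : Int) + 1 = ((m - k + 1 : Nat) : Int) := by omega
      rw [hb, PySem.List.pyRange_zero_natCast]
      rw [List.map_map]
      apply List.map_congr_left
      intro i hi
      have hi' : i < m - k + 1 := List.mem_range.mp hi
      have e : ((i : Nat) : Int) + n = ((i + k : Nat) : Int) := by push_cast; omega
      simp only [Function.comp_apply]
      rw [e, prefs_zero_getD_cast l (i + k) (by omega), prefs_zero_getD_cast l i (by omega)]
      rw [winS_eq_takes]
    rw [hmapB]
    have hrange : List.range (m - k + 1) = 0 :: (List.range (m - k)).map Nat.succ :=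
      List.range_succ_eq_map
    rw [hrange]
    simp only [List.map_cons, List.map_map]
    rw [PySem.List.max?_id_cons]
    simp only [Function.comp_def, Nat.succ_eq_add_one, Option.getD_some]

-- ===== VERDICT (by name: the statement is the Claim_ definition above) =====
theorem opt_dist_old_spec : Claim_equal_opt_dist_old := by
  intro l n _ hpre
  unfold Spec_opt_dist_old
  exact opt_dist_old_spec_aux l n hpre
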